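-- pv_equiv track=rewrite | github.com/christineyhz/AUTO-T-SHIRT-GENERATOR | algorithm/redbubble_scrape.py | plural_list_converter
-- ===== SOURCE A (Python) =====
-- def plural_list_converter(single_list):
--     combo_list = []
--     for i in single_list:
--         modifiedWord = ""
--         if i.endswith("y"):
--             modifiedWord = i[0:len(i) -1] + "ies"
--         elif i.endswith("f"):
--             modifiedWord = i[0:len(i) -1] + "ves"
--         elif i.endswith("f"):
--             modifiedWord = i[0:len(i) -2] + "ves"
--         elif i.endswith("s") or i.endswith("x") or i.endswith("z") or i.endswith("ch") or i.endswith("sh"):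
--             modifiedWord = i + "es"
--         elif i.endswith("us"):
--             modifiedWord = i[0:len(i) -2] + "i"
--         else:
--             modifiedWord = i + "s"
--
--         combo_list.append(i)
--         combo_list.append(modifiedWord)
--
--     return combo_list
-- ===== SOURCE B (Python) =====
-- # Staged rewrite: a dict dispatch keyed on the word's final character picks the
-- # pluralizer; plurals are computed in one pass, then interleaved with the words.
-- _SIMPLE = {
--     "y": lambda w: w[:-1] + "ies",
--     "f": lambda w: w[:-1] + "ves",
--     "s": lambda w: w + "es",
--     "x": lambda w: w + "es",
--     "z": lambda w: w + "es",
--     "h": lambda w: w + "es" if w[-2:-1] in ("c", "s") else w + "s",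
-- }
--
-- def _plural(w):
--     rule = _SIMPLE.get(w[-1:])
--     return rule(w) if rule else w + "s"
--
-- def plural_list_converter(single_list):
--     plurals = [_plural(w) for w in single_list]
--     return [x for pair in zip(single_list, plurals) for x in pair]
-- ===== Notes on version B (the rewrite author's own statement) =====
-- stated objective: alternative
-- what changed: Replaces A's single-pass if/elif endswith ladder (with its dead duplicate-'f' and shadowed 'us' branches) by a dict dispatch keyed on the word's final character plus a staged pipeline: one pass computes the plurals, a second zips them back with the words.
import Mathlib
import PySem

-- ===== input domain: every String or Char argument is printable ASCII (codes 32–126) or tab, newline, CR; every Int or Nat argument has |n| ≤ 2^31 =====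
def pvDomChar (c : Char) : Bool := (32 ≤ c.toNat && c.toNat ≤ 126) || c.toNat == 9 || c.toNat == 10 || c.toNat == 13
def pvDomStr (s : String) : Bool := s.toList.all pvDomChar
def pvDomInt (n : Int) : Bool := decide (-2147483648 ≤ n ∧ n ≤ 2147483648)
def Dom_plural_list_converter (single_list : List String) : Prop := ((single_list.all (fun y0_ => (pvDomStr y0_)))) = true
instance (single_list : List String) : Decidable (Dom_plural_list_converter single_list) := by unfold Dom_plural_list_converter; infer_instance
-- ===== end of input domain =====

-- B replaces A's if/elif endswith ladder (which carries dead 'f' and 'us' branches) by a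
-- dict dispatch on the final character plus a staged map-then-zip pipeline; same output.

-- ===== PORT A =====
def plural_list_converter (single_list : List String) : List String :=
  single_list.foldl (fun combo_list i =>
    let modifiedWord : String :=
      if PySem.Str.endswith i "y" then
        PySem.Str.slice i (some 0) (some (PySem.Str.len i - 1)) ++ "ies"
      else if PySem.Str.endswith i "f" then
        PySem.Str.slice i (some 0) (some (PySem.Str.len i - 1)) ++ "ves"
      else if PySem.Str.endswith i "f" then
        PySem.Str.slice i (some 0) (some (PySem.Str.len i - 2)) ++ "ves"
      else if PySem.Str.endswith i "s" || PySem.Str.endswith i "x" || PySem.Str.endswith i "z"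
           || PySem.Str.endswith i "ch" || PySem.Str.endswith i "sh" then
        i ++ "es"
      else if PySem.Str.endswith i "us" then
        PySem.Str.slice i (some 0) (some (PySem.Str.len i - 2)) ++ "i"
      else
        i ++ "s"
    (combo_list ++ [i]) ++ [modifiedWord]) []

-- ===== PORT B =====
-- _SIMPLE: dict keyed on the word's final character
def pvSimple : PySem.Dict String (String → String) := PySem.Dict.mk
  [ ("y", fun w => PySem.Str.slice w none (some (-1)) ++ "ies")
  , ("f", fun w => PySem.Str.slice w none (some (-1)) ++ "ves")
  , ("s", fun w => w ++ "es")
  , ("x", fun w => w ++ "es")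
  , ("z", fun w => w ++ "es")
  , ("h", fun w =>
      if ["c", "s"].contains (PySem.Str.slice w (some (-2)) (some (-1))) then w ++ "es"
      else w ++ "s") ]

def pvPlural (w : String) : String :=
  match PySem.Dict.get? pvSimple (PySem.Str.slice w (some (-1)) none) with
  | some rule => rule w
  | none => w ++ "s"

def plural_list_converter_alt (single_list : List String) : List String :=
  let plurals := single_list.map pvPlural
  (single_list.zip plurals).flatMap (fun p => [p.1, p.2])

-- ===== PRECONDITION & SPEC =====
def Spec_plural_list_converter (single_list : List String) (out : List String) : Prop := out = plural_list_converter_alt single_list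
instance (single_list : List String) (out : List String) : Decidable (Spec_plural_list_converter single_list out) := by unfold Spec_plural_list_converter; infer_instance

-- ===== CLAIM (what is proved, stated in full; the proofs are below) =====
def Claim_equal_plural_list_converter : Prop := ∀ (single_list : List String), Dom_plural_list_converter single_list → Spec_plural_list_converter single_list (plural_list_converter single_list)

-- ===== LEMMAS AND PROOFS =====


-- a word not ending (at the list level) helpers, specific to the two programs' suffix tests

-- [] never ends with a nonempty pattern
theorem pv_ends_nil (c : Char) (p : List Char) : PySem.Chars.endswith [] (c :: p) = false := by
  rw [Bool.eq_false_iff]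
  intro hc
  rw [PySem.Chars.endswith_iff] at hc
  have := hc.length_le
  simp at this

-- endswith on a one-char pattern reads the last character
theorem pv_ends1 (l : List Char) (a b : Char) :
    PySem.Chars.endswith (l ++ [a]) [b] = decide (a = b) := by
  by_cases h : a = b
  · simp [PySem.Chars.endswith_iff, h]
  · simp only [decide_eq_false h, Bool.eq_false_iff]
    intro hc
    rw [PySem.Chars.endswith_iff] at hc
    rcases hc with ⟨t, ht⟩
    have := congrArg List.getLast? ht
    simp at this
    exact h this.symm

-- endswith on a two-char pattern reads the last two characters
theorem pv_ends2 (l : List Char) (a b c d : Char) :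
    PySem.Chars.endswith (l ++ [a, b]) [c, d] = (decide (a = c) && decide (b = d)) := by
  by_cases h : a = c ∧ b = d
  · simp [PySem.Chars.endswith_iff, h.1, h.2]
  · have : ¬ (decide (a = c) && decide (b = d)) = true := by simpa using fun h1 h2 => h ⟨h1, h2⟩
    simp only [Bool.eq_false_iff.mpr this, Bool.eq_false_iff]
    intro hc
    rw [PySem.Chars.endswith_iff] at hc
    rcases hc with ⟨t, ht⟩
    have h2 := congrArg List.getLast? ht
    have h1 := congrArg (List.getLast? ∘ List.dropLast) ht
    simp at h1 h2
    exact h ⟨h1.symm, h2.symm⟩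

-- a one-char list never ends with a two-char pattern
theorem pv_ends2_single (a c d : Char) : PySem.Chars.endswith [a] [c, d] = false := by
  rw [Bool.eq_false_iff]
  intro hc
  rw [PySem.Chars.endswith_iff] at hc
  have := hc.length_le
  simp at this

-- a list whose last char differs from the pattern's never ends with the two-char pattern
theorem pv_ends2_ne (l : List Char) (a c d : Char) (h : a ≠ d) :
    PySem.Chars.endswith (l ++ [a]) [c, d] = false := by
  rw [Bool.eq_false_iff]
  intro hc
  rw [PySem.Chars.endswith_iff] at hc
  rcases hc with ⟨t, ht⟩
  have := congrArg List.getLast? ht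
  simp at this
  exact h this.symm

-- i[0:len(i)-1] is i[:-1], on the char-list level
theorem pv_slice_pred_list (l : List Char) :
    PySem.List.slice l (some 0) (some ((l.length : Int) - 1)) = PySem.List.slice l none (some (-1)) := by
  cases l with
  | nil => simp [PySem.List.slice]
  | cons c cs =>
    have h1 : (((c :: cs).length : Int) - 1) = (((c :: cs).length - 1 : Nat) : Int) := by simp
    rw [h1, PySem.List.slice_zero_start, PySem.List.slice_to_natCast,
        PySem.List.slice_to_neg_one, List.dropLast_eq_take]

-- i[0:len(i)-1] is i[:-1]
theorem pv_slice_pred (s : String) :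
    PySem.Str.slice s (some 0) (some ((s.length : Int) - 1)) = PySem.Str.slice s none (some (-1)) := by
  apply String.toList_inj.mp
  simp only [PySem.Str.toList_slice, PySem.Chars.slice_eq_listSlice]
  have hl : (s.length : Int) = (s.toList.length : Int) := by simp
  rw [hl, pv_slice_pred_list]

-- the dict misses a key that is not a single char among y f s x z h
set_option maxRecDepth 2048 in
theorem pv_lookup_none (K : String) (a : Char) (hk : K.toList = [a])
    (h : a ∉ (['y','f','s','x','z','h'] : List Char)) :
    PySem.Dict.get? pvSimple K = none := by
  have hne : ∀ (s : String) (b : Char), s.toList = [b] → b ≠ a → (s == K) = false := by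
    intro s b hs hb
    rw [beq_eq_false_iff_ne]
    intro he
    exact hb (by have := hs ▸ he ▸ hk; simpa using this)
  simp only [List.mem_cons, not_or] at h
  unfold pvSimple
  simp [PySem.Dict.get?,
    hne "y" 'y' (by decide) (Ne.symm h.1), hne "f" 'f' (by decide) (Ne.symm h.2.1),
    hne "s" 's' (by decide) (Ne.symm h.2.2.1), hne "x" 'x' (by decide) (Ne.symm h.2.2.2.1),
    hne "z" 'z' (by decide) (Ne.symm h.2.2.2.2.1), hne "h" 'h' (by decide) (Ne.symm h.2.2.2.2.2.1)]

-- the dict misses the empty key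
theorem pv_lookup_nil (K : String) (hk : K.toList = []) :
    PySem.Dict.get? pvSimple K = none := by
  have : K = "" := by apply String.toList_inj.mp; rw [hk]; decide
  subst this; decide

-- a single-char string that is neither "c" nor "s" is not in ["c","s"]
theorem pv_cs_false (s : String) (b : Char) (hs : s.toList = [b]) (h1 : b ≠ 'c') (h2 : b ≠ 's') :
    (["c", "s"] : List String).contains s = false := by
  rw [Bool.eq_false_iff]
  intro hc
  have hm : s = "c" ∨ s = "s" := by simpa using hc
  rcases hm with hm | hm
  · exact h1 (by have := hm ▸ hs; simpa using this.symm)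
  · exact h2 (by have := hm ▸ hs; simpa using this.symm)

theorem pv_word (i : String) :
    (if PySem.Str.endswith i "y" then
        PySem.Str.slice i (some 0) (some (PySem.Str.len i - 1)) ++ "ies"
      else if PySem.Str.endswith i "f" then
        PySem.Str.slice i (some 0) (some (PySem.Str.len i - 1)) ++ "ves"
      else if PySem.Str.endswith i "f" then
        PySem.Str.slice i (some 0) (some (PySem.Str.len i - 2)) ++ "ves"
      else if PySem.Str.endswith i "s" || PySem.Str.endswith i "x" || PySem.Str.endswith i "z"
           || PySem.Str.endswith i "ch" || PySem.Str.endswith i "sh" then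
        i ++ "es"
      else if PySem.Str.endswith i "us" then
        PySem.Str.slice i (some 0) (some (PySem.Str.len i - 2)) ++ "i"
      else
        i ++ "s") = pvPlural i := by
  have hkey := PySem.Str.toList_slice i (some (-1)) none
  rw [PySem.Chars.slice_eq_listSlice, PySem.List.slice_from_neg_one] at hkey
  have ty : "y".toList = ['y'] := rfl
  have tf : "f".toList = ['f'] := rfl
  have ts : "s".toList = ['s'] := rfl
  have tx : "x".toList = ['x'] := rfl
  have tz : "z".toList = ['z'] := rfl
  have tch : "ch".toList = ['c', 'h'] := rfl
  have tsh : "sh".toList = ['s', 'h'] := rfl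
  have tus : "us".toList = ['u', 's'] := rfl
  rcases List.eq_nil_or_concat i.toList with h0 | ⟨L, a, h0⟩
  · rw [h0] at hkey
    simp only [List.length_nil, List.drop_nil] at hkey
    simp only [PySem.Str.endswith_eq, h0, ty, tf, ts, tx, tz, tch, tsh, tus, pv_ends_nil]
    unfold pvPlural
    rw [pv_lookup_nil _ hkey]
    simp
  · rw [List.concat_eq_append] at h0
    rw [h0] at hkey
    simp at hkey
    -- the slice i[0:len(i)-1] is i[:-1]
    have hpred : PySem.Str.slice i (some 0) (some (PySem.Str.len i - 1))
        = PySem.Str.slice i none (some (-1)) := by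
      rw [PySem.Str.len_eq, show ((i.toList.length : Int)) = ((i.length : Int)) by simp,
        pv_slice_pred]
    simp only [PySem.Str.endswith_eq, h0, ty, tf, ts, tx, tz, tch, tsh, tus, pv_ends1]
    by_cases hy : a = 'y'
    · have hk : PySem.Str.slice i (some (-1)) none = "y" := by
        apply String.toList_inj.mp; simp [hkey, hy]
      unfold pvPlural
      rw [hk, hpred]
      simp [hy]
      rfl
    · by_cases hf : a = 'f'
      · have hk : PySem.Str.slice i (some (-1)) none = "f" := by
          apply String.toList_inj.mp; simp [hkey, hf]
        unfold pvPlural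
        rw [hk, hpred]
        simp [hf]
        rfl
      · by_cases hs : a = 's'
        · have hk : PySem.Str.slice i (some (-1)) none = "s" := by
            apply String.toList_inj.mp; simp [hkey, hs]
          unfold pvPlural
          rw [hk]
          simp [hs]
          rfl
        · by_cases hx : a = 'x'
          · have hk : PySem.Str.slice i (some (-1)) none = "x" := by
              apply String.toList_inj.mp; simp [hkey, hx]
            unfold pvPlural
            rw [hk]
            simp [hx]
            rfl
          · by_cases hz : a = 'z'
            · have hk : PySem.Str.slice i (some (-1)) none = "z" := by
                apply String.toList_inj.mp; simp [hkey, hz]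
              unfold pvPlural
              rw [hk]
              simp [hz]
              rfl
            · by_cases hh : a = 'h'
              · -- final char 'h': A tests endswith "ch"/"sh"; B's handler reads i[-2:-1]
                have hk : PySem.Str.slice i (some (-1)) none = "h" := by
                  apply String.toList_inj.mp; simp [hkey, hh]
                have hkey2 := PySem.Str.toList_slice i (some (-2)) (some (-1))
                rw [PySem.Chars.slice_eq_listSlice, h0] at hkey2
                unfold pvPlural
                rw [hk]
                have hrule : PySem.Dict.get? pvSimple "h"
                    = some (fun w => if (["c", "s"] : List String).contains
                        (PySem.Str.slice w (some (-2)) (some (-1))) then w ++ "es"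
                        else w ++ "s") := rfl
                rw [hrule]
                simp only [hy, hf, hs, hx, hz, decide_false, Bool.false_or]
                rcases List.eq_nil_or_concat L with hL | ⟨M, b, hL⟩
                · -- i is the single char "h": no "ch"/"sh", and i[-2:-1] is empty
                  subst hL
                  have hcs : (PySem.Str.slice i (some (-2)) (some (-1))) = "" := by
                    apply String.toList_inj.mp
                    rw [hkey2]
                    simp [PySem.List.slice]
                  simp [pv_ends2_single, hcs, hh]
                · rw [List.concat_eq_append] at hL
                  subst hL
                  rw [List.append_assoc] at hkey2
                  have hb : (PySem.Str.slice i (some (-2)) (some (-1))).toList = [b] := by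
                    rw [hkey2]
                    simp [PySem.List.slice]
                  rw [List.append_assoc]
                  simp only [List.cons_append, List.nil_append,
                    pv_ends2, hh, decide_true, Bool.and_true]
                  by_cases hc : b = 'c'
                  · have hcv : (PySem.Str.slice i (some (-2)) (some (-1))) = "c" := by
                      apply String.toList_inj.mp; rw [hb, hc]; decide
                    simp [hc, hcv]
                  · by_cases hs2 : b = 's'
                    · have hsv : (PySem.Str.slice i (some (-2)) (some (-1))) = "s" := by
                        apply String.toList_inj.mp; rw [hb, hs2]; decide
                      simp [hs2, hsv]
                    · rw [pv_cs_false _ _ hb hc hs2]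
                      simp [hc, hs2]
              · -- last char matches no rule: both sides append "s"
                unfold pvPlural
                have hk2 : (PySem.Str.slice i (some (-1)) none).toList = [a] := by simp [hkey]
                rw [pv_lookup_none _ a hk2 (by simp [hy, hf, hs, hx, hz, hh])]
                simp [hy, hf, hs, hx, hz,
                  pv_ends2_ne L a 'c' 'h' hh, pv_ends2_ne L a 's' 'h' hh,
                  pv_ends2_ne L a 'u' 's' hs]

theorem pv_main (l acc : List String) :
    l.foldl (fun combo_list i =>
      (combo_list ++ [i]) ++ [(fun j =>
        if PySem.Str.endswith j "y" then
          PySem.Str.slice j (some 0) (some (PySem.Str.len j - 1)) ++ "ies"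
        else if PySem.Str.endswith j "f" then
          PySem.Str.slice j (some 0) (some (PySem.Str.len j - 1)) ++ "ves"
        else if PySem.Str.endswith j "f" then
          PySem.Str.slice j (some 0) (some (PySem.Str.len j - 2)) ++ "ves"
        else if PySem.Str.endswith j "s" || PySem.Str.endswith j "x" || PySem.Str.endswith j "z"
             || PySem.Str.endswith j "ch" || PySem.Str.endswith j "sh" then
          j ++ "es"
        else if PySem.Str.endswith j "us" then
          PySem.Str.slice j (some 0) (some (PySem.Str.len j - 2)) ++ "i"
        else
          j ++ "s") i]) acc
    = acc ++ (l.zip (l.map pvPlural)).flatMap (fun p => [p.1, p.2]) := by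
  induction l generalizing acc with
  | nil => simp
  | cons x xs ih =>
    simp only [List.foldl_cons, List.map_cons, List.zip_cons_cons, List.flatMap_cons, ih]
    rw [pv_word x]
    simp

-- ===== VERDICT (by name: the statement is the Claim_ definition above) =====
theorem plural_list_converter_spec : Claim_equal_plural_list_converter := by
  intro l _
  show plural_list_converter l = plural_list_converter_alt l
  unfold plural_list_converter plural_list_converter_alt
  simpa using pv_main l []
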